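-- pv_equiv track=rewrite | github.com/jcolinpatrick/kryptos | scripts/blitz/blitz_model2_novel.py | modular_group_perm
-- ===== SOURCE A (Python) =====
-- from collections import Counter, defaultdict
--
-- def modular_group_perm(ct_str, period, group_order):
--     """
--     Split positions 0..N-1 into groups by pos % period.
--     group_order[i] = which residue class goes to output position i.
--     Result: concatenate the characters of each residue class in group_order order.
--     This is equivalent to specific columnar transpositions.
--     """
--     n = len(ct_str)
--     groups = defaultdict(list)
--     for pos in range(n):
--         groups[pos % period].append(ct_str[pos])
--
--     result = []
--     for r in group_order:
--         result.extend(groups[r])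
--     return ''.join(result)
-- ===== SOURCE B (Python) =====
-- def modular_group_perm(ct_str, period, group_order):
--     """
--     For each requested residue class r (in group_order order), emit the
--     characters of ct_str whose position is congruent to r modulo period.
--     """
--     return ''.join(ct_str[pos]
--                    for r in group_order
--                    for pos in range(len(ct_str))
--                    if pos % period == r)
-- ===== Notes on version B (the rewrite author's own statement) =====
-- stated objective: simpler
-- what changed: Drops A's defaultdict bucket-building pass and bucket-lookup loop in favour of a single join over a comprehension that, for each requested residue, filters the positions of that residue class directly.
-- crash fix: When period == 0 with a non-empty string and an empty group_order, A raises ZeroDivisionError (it computes pos % 0) while B returns '' since it never evaluates the modulus. — e.g. on modular_group_perm("a", 0, []): A raises ZeroDivisionError, B returns ""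
import Mathlib
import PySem

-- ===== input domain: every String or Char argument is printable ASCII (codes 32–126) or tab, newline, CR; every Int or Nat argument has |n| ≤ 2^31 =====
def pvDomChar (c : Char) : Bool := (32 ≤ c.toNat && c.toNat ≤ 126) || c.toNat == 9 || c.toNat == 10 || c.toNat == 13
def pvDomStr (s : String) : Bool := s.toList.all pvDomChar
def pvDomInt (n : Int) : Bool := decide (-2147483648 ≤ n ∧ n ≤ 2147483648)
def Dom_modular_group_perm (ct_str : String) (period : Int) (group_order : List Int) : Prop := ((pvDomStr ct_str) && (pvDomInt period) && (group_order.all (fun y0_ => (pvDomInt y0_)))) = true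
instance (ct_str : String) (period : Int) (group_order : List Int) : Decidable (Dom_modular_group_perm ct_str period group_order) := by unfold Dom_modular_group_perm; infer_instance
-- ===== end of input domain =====

-- B replaces A's defaultdict bucket-building pass with a direct per-residue filter over the
-- positions, joined in group_order order (objective: simpler — the dict disappears).

-- ===== PORT A =====
-- Literal port of A. Note: Python's defaultdict read `groups[r]` inserts a missing key with [],
-- which never changes any later read's VALUE (always []); the read is ported as getD r [] — exact
-- for the returned string.
def modular_group_perm (ct_str : String) (period : Int) (group_order : List Int) : String :=
  let chars := ct_str.toList
  let n : Int := PySem.Str.len ct_str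
  let groups : PySem.Dict Int (List Char) :=
    (PySem.List.pyRange 0 n 1).foldl
      (fun g pos => g.modify (PySem.Int.mod pos period) []
        (fun l => l ++ [PySem.List.pyGetD chars pos ' '])) PySem.Dict.empty
  let result : List Char := group_order.foldl (fun acc r => acc ++ groups.getD r []) []
  String.ofList result

-- ===== PORT B =====
def modular_group_perm_alt (ct_str : String) (period : Int) (group_order : List Int) : String :=
  let chars := ct_str.toList
  let n : Int := PySem.Str.len ct_str
  String.ofList (group_order.flatMap (fun r =>
    ((PySem.List.pyRange 0 n 1).filter (fun pos => PySem.Int.mod pos period == r)).map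
      (fun pos => PySem.List.pyGetD chars pos ' ')))

-- ===== PRECONDITION & SPEC =====
-- Pre_ excludes exactly the inputs where Python A raises ZeroDivisionError: period == 0 with a
-- non-empty string (pos % 0 is evaluated for some position).
def Pre_modular_group_perm (ct_str : String) (period : Int) (group_order : List Int) : Prop :=
  period ≠ 0 ∨ ct_str = ""
instance (ct_str : String) (period : Int) (group_order : List Int) : Decidable (Pre_modular_group_perm ct_str period group_order) := by unfold Pre_modular_group_perm; infer_instance
def pvWitness_modular_group_perm : String × Int × List Int := ("ABCDEF", 3, [1, 0, 2])

-- A raises ZeroDivisionError when period == 0, ct_str is non-empty and group_order is empty; B returns "".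
def Raises_modular_group_perm (ct_str : String) (period : Int) (group_order : List Int) : Prop :=
  period = 0 ∧ ct_str ≠ "" ∧ group_order = []
instance (ct_str : String) (period : Int) (group_order : List Int) : Decidable (Raises_modular_group_perm ct_str period group_order) := by unfold Raises_modular_group_perm; infer_instance
def pvRaiseWitness_modular_group_perm : String × Int × List Int := ("a", 0, [])
def pvRaiseWitnessOut_modular_group_perm : String := ""

def Spec_modular_group_perm (ct_str : String) (period : Int) (group_order : List Int) (out : String) : Prop := out = modular_group_perm_alt ct_str period group_order
instance (ct_str : String) (period : Int) (group_order : List Int) (out : String) : Decidable (Spec_modular_group_perm ct_str period group_order out) := by unfold Spec_modular_group_perm; infer_instance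

-- ===== CLAIM (what is proved, stated in full; the proofs are below) =====
def Claim_equal_modular_group_perm : Prop := ∀ (ct_str : String) (period : Int) (group_order : List Int), Dom_modular_group_perm ct_str period group_order → Pre_modular_group_perm ct_str period group_order → Spec_modular_group_perm ct_str period group_order (modular_group_perm ct_str period group_order)
def Claim_raises_modular_group_perm : Prop := (∀ (ct_str : String) (period : Int) (group_order : List Int), Dom_modular_group_perm ct_str period group_order → Raises_modular_group_perm ct_str period group_order → ¬ Pre_modular_group_perm ct_str period group_order) ∧ (Dom_modular_group_perm (pvRaiseWitness_modular_group_perm.1) (pvRaiseWitness_modular_group_perm.2.1) (pvRaiseWitness_modular_group_perm.2.2) ∧ Raises_modular_group_perm (pvRaiseWitness_modular_group_perm.1) (pvRaiseWitness_modular_group_perm.2.1) (pvRaiseWitness_modular_group_perm.2.2) ∧ modular_group_perm_alt (pvRaiseWitness_modular_group_perm.1) (pvRaiseWitness_modular_group_perm.2.1) (pvRaiseWitness_modular_group_perm.2.2) = pvRaiseWitnessOut_modular_group_perm)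

-- ===== LEMMAS AND PROOFS =====

-- A's bucket dictionary, read at residue r, is exactly B's filtered position list mapped to chars.
theorem groups_getD_eq (chars : List Char) (period : Int) (n r : Int) :
    ((PySem.List.pyRange 0 n 1).foldl
      (fun g pos => g.modify (PySem.Int.mod pos period) []
        (fun l => l ++ [PySem.List.pyGetD chars pos ' '])) PySem.Dict.empty).getD r []
    = ((PySem.List.pyRange 0 n 1).filter (fun pos => PySem.Int.mod pos period == r)).map
        (fun pos => PySem.List.pyGetD chars pos ' ') := by
  have h := PySem.Dict.getD_foldl_modify_append
    (l := (PySem.List.pyRange 0 n 1).map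
      (fun pos => (PySem.Int.mod pos period, PySem.List.pyGetD chars pos ' ')))
    (d := (PySem.Dict.empty : PySem.Dict Int (List Char))) (c := r)
  simpa [List.foldl_map, List.filter_map, Function.comp] using h

theorem modular_group_perm_eq_alt (ct_str : String) (period : Int) (group_order : List Int) :
    modular_group_perm ct_str period group_order = modular_group_perm_alt ct_str period group_order := by
  unfold modular_group_perm modular_group_perm_alt
  simp only [groups_getD_eq, PySem.List.foldl_append_eq_flatMap]
  simp

-- ===== VERDICT (by name: the statement is the Claim_ definition above) =====
theorem modular_group_perm_spec : Claim_equal_modular_group_perm := by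
  intro ct_str period group_order _ _
  exact modular_group_perm_eq_alt ct_str period group_order

theorem modular_group_perm_raises : Claim_raises_modular_group_perm := by
  unfold Claim_raises_modular_group_perm
  exact ⟨by intro s p g _ hr; rcases hr with ⟨h0, hs, -⟩; rintro (h | h) <;> [exact h h0; exact hs h], by decide⟩

-- Self-check extracted from the crash-fix verdict: at the raise witness B's port returns "".
theorem modular_group_perm_raises_ok :
    modular_group_perm_alt "a" 0 [] = pvRaiseWitnessOut_modular_group_perm := by
  have h := modular_group_perm_raises
  unfold Claim_raises_modular_group_perm at h
  exact h.2.2.2
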